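-- pv_equiv track=rewrite | github.com/morinted/plover-inversion | make_inverted.py | make_sequences
-- ===== SOURCE A (Python) =====
-- def make_sequences(char_list):
--     # Final result of all possible combos of numbers
--     result = []
--
--     # The numbers that have been iterated over
--     singles = []
--
--     for number in char_list:
--         new_entries = []
--         for article in result + singles:
--             new_entries.append(article + number)
--         result.extend(new_entries)
--         singles.append(number)
--     return result
-- ===== SOURCE B (Python) =====
-- def make_sequences(char_list):
--     # Recursive on the prefix: results for the prefix come first, then each
--     # prefix result and each prefix element with the last char appended.
--     if not char_list:
--         return []
--     head = char_list[:-1]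
--     last = char_list[-1]
--     prev = make_sequences(head)
--     return prev + [x + last for x in prev + head]
-- ===== Notes on version B (the rewrite author's own statement) =====
-- stated objective: alternative
-- what changed: Replaced the imperative loop maintaining two accumulators (result, singles) with a recursion on the prefix: f(cs) = prev + [x+last for x in prev + head], binding prev once.
import Mathlib
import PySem

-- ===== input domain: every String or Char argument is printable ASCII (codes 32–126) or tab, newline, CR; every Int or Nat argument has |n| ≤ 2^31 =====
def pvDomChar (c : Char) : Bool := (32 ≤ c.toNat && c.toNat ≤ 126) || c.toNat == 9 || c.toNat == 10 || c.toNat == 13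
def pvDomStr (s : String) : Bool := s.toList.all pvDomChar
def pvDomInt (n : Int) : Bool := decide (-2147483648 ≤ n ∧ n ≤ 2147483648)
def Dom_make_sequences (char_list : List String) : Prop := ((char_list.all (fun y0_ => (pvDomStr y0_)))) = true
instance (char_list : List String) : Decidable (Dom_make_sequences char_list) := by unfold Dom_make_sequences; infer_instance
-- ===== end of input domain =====

-- B replaces A's loop over two accumulators by a recursion on the list prefix (alternative decomposition, same cost).

-- ===== PORT A =====
-- loop state: (result, singles)
def make_sequences (char_list : List String) : List String :=
  (char_list.foldl
    (fun (st : List String × List String) number =>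
      let new_entries := (st.1 ++ st.2).map (fun article => article ++ number)
      (st.1 ++ new_entries, st.2 ++ [number]))
    ([], [])).1

-- ===== PORT B =====
def make_sequences_alt (char_list : List String) : List String :=
  if h : char_list = [] then []
  else
    let head := char_list.dropLast
    let last := char_list.getLast h
    let prev := make_sequences_alt head
    prev ++ (prev ++ head).map (fun x => x ++ last)
termination_by char_list.length
decreasing_by
  simp only [List.length_dropLast]
  cases char_list with
  | nil => exact absurd rfl h
  | cons a t => simp

-- ===== PRECONDITION & SPEC =====
def Spec_make_sequences (char_list : List String) (out : List String) : Prop := out = make_sequences_alt char_list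
instance (char_list : List String) (out : List String) : Decidable (Spec_make_sequences char_list out) := by unfold Spec_make_sequences; infer_instance

-- ===== CLAIM (what is proved, stated in full; the proofs are below) =====
def Claim_equal_make_sequences : Prop := ∀ (char_list : List String), Dom_make_sequences char_list → Spec_make_sequences char_list (make_sequences char_list)

-- ===== LEMMAS AND PROOFS =====

theorem alt_nil : make_sequences_alt [] = [] := by
  unfold make_sequences_alt; simp

theorem alt_snoc (p : List String) (n : String) :
    make_sequences_alt (p ++ [n]) =
      make_sequences_alt p ++ (make_sequences_alt p ++ p).map (fun x => x ++ n) := by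
  rw [make_sequences_alt]
  simp

theorem foldl_inv (l p : List String) :
    l.foldl
      (fun (st : List String × List String) number =>
        let new_entries := (st.1 ++ st.2).map (fun article => article ++ number)
        (st.1 ++ new_entries, st.2 ++ [number]))
      (make_sequences_alt p, p)
    = (make_sequences_alt (p ++ l), p ++ l) := by
  induction l generalizing p with
  | nil => simp
  | cons n t ih =>
    simp only [List.foldl_cons]
    have := ih (p ++ [n])
    rw [alt_snoc] at this
    simpa using this

-- ===== VERDICT (by name: the statement is the Claim_ definition above) =====
theorem make_sequences_spec : Claim_equal_make_sequences := by
  intro char_list _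
  show _ = _
  unfold make_sequences
  have h := foldl_inv char_list []
  rw [alt_nil] at h
  simp only [List.nil_append] at h
  rw [h]
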